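-- pv_equiv track=rewrite | github.com/christofmuc/KnobKraft-orm | adaptations/Korg_Triton.py | escapeSysex
-- ===== SOURCE A (Python) =====
-- from typing import List, Optional, Tuple
--
-- def escapeSysex(data: List[int]) -> List[int]:
--     result = []
--     index = 0
--     while index < len(data):
--         msb = 0
--         chunk = data[index:index + 7]
--         for bit, value in enumerate(chunk):
--             if value & 0x80:
--                 msb |= 1 << bit
--         result.append(msb)
--         for value in chunk:
--             result.append(value & 0x7F)
--         index += 7
--     return result
-- ===== SOURCE B (Python) =====
-- def escapeSysex(data):
--     # One linear pass with back-patching: a placeholder MSB byte is appended at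
--     # each group boundary (i % 7 == 0) and OR-patched as data bytes are emitted.
--     result = []
--     msb_pos = 0
--     for i, value in enumerate(data):
--         if i % 7 == 0:
--             msb_pos = len(result)
--             result.append(0)
--         result.append(value & 0x7F)
--         if value & 0x80:
--             result[msb_pos] |= 1 << (i % 7)
--     return result
-- ===== Notes on version B (the rewrite author's own statement) =====
-- stated objective: alternative
-- what changed: Replaced A's chunked loop (slice each 7-byte chunk, a first inner pass computing the MSB byte, a second inner pass emitting the data bytes) with a single linear scan that appends a zero placeholder at each group boundary and OR-back-patches it in place as each byte is emitted.
import Mathlib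
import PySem

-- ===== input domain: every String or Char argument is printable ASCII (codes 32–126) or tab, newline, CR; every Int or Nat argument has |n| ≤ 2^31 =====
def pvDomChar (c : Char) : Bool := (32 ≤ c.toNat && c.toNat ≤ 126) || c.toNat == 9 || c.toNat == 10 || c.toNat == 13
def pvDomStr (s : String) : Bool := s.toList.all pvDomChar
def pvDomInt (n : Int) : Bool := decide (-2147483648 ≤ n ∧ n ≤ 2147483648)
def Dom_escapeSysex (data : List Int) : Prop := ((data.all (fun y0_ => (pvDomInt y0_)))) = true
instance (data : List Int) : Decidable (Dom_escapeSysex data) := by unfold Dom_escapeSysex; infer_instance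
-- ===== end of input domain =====

-- B replaces A's chunked slice-and-two-inner-loops with a single linear pass that appends a
-- placeholder MSB byte at each group boundary and OR-back-patches it (objective: alternative decomposition).

-- ===== PORT A =====
-- while index < len(data): take chunk = data[index:index+7], compute msb over enumerate(chunk),
-- append msb then the 7-bit bytes, advance index by 7.
def escapeSysexLoop (data : List Int) (index : Nat) (result : List Int) : List Int :=
  if _h : index < data.length then
    let chunk := PySem.List.slice data (some (index : Int)) (some ((index : Int) + 7))
    let msb : Int := (PySem.List.enumerate chunk).foldl
      (fun msb p => if PySem.Int.band p.2 0x80 ≠ 0 then PySem.Int.bor msb ((1 : Int) <<< p.1.toNat) else msb) 0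
    let result := result ++ [msb]
    let result := chunk.foldl (fun r v => r ++ [PySem.Int.band v 0x7F]) result
    escapeSysexLoop data (index + 7) result
  else result
termination_by data.length - index
decreasing_by omega

def escapeSysex (data : List Int) : List Int := escapeSysexLoop data 0 []

-- ===== PORT B =====
-- for i, value in enumerate(data): placeholder at i % 7 == 0, append value & 0x7F,
-- and if value & 0x80 back-patch result[msb_pos] |= 1 << (i % 7).
def escapeStep (st : List Int × Nat) (p : Int × Int) : List Int × Nat :=
  let rm := if PySem.Int.mod p.1 7 = 0 then (st.1 ++ [(0 : Int)], st.1.length) else (st.1, st.2)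
  let result := rm.1 ++ [PySem.Int.band p.2 0x7F]
  let result2 := if PySem.Int.band p.2 0x80 ≠ 0 then
      result.modify rm.2 (fun m => PySem.Int.bor m ((1 : Int) <<< (PySem.Int.mod p.1 7).toNat))
    else result
  (result2, rm.2)

def escapeSysex_alt (data : List Int) : List Int :=
  ((PySem.List.enumerate data).foldl escapeStep ([], 0)).1

-- ===== PRECONDITION & SPEC =====
def Spec_escapeSysex (data : List Int) (out : List Int) : Prop := out = escapeSysex_alt data
instance (data : List Int) (out : List Int) : Decidable (Spec_escapeSysex data out) := by unfold Spec_escapeSysex; infer_instance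

-- ===== CLAIM (what is proved, stated in full; the proofs are below) =====
def Claim_equal_escapeSysex : Prop := ∀ (data : List Int), Dom_escapeSysex data → Spec_escapeSysex data (escapeSysex data)

-- ===== LEMMAS AND PROOFS =====

theorem modify_mid (l1 : List Int) (a : Int) (l2 : List Int) (f : Int → Int) :
    (l1 ++ a :: l2).modify l1.length f = l1 ++ f a :: l2 := by
  induction l1 with
  | nil => simp [List.modify]
  | cons x xs ih => simp only [List.modify] at ih; simp [List.modify, ih]

-- the MSB accumulator both programs compute over one chunk, bit index j
def msbAux (c : List Int) (j : Nat) (m : Int) : Int :=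
  match c with
  | [] => m
  | v :: c' => msbAux c' (j + 1) (if PySem.Int.band v 0x80 ≠ 0 then PySem.Int.bor m ((1 : Int) <<< (j : Int)) else m)

-- common characterisation of both results: msb of each 7-chunk followed by its masked bytes
def specFn : List Int → List Int
  | [] => []
  | v :: l => msbAux ((v :: l).take 7) 0 0 ::
      (((v :: l).take 7).map (fun x => PySem.Int.band x 0x7F) ++ specFn (l.drop 6))
termination_by l => l.length
decreasing_by simp

theorem specFn_nil : specFn [] = [] := by unfold specFn; rfl

theorem specFn_cons (v : Int) (l : List Int) : specFn (v :: l) = msbAux ((v :: l).take 7) 0 0 ::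
    (((v :: l).take 7).map (fun x => PySem.Int.band x 0x7F) ++ specFn (l.drop 6)) := by
  conv_lhs => unfold specFn

theorem msb_fold (c : List Int) (s : Nat) (m : Int) :
    (PySem.List.enumerate c (s : Int)).foldl
      (fun msb p => if PySem.Int.band p.2 0x80 ≠ 0 then PySem.Int.bor msb ((1 : Int) <<< p.1.toNat) else msb) m
      = msbAux c s m := by
  induction c generalizing s m with
  | nil => simp [PySem.List.enumerate_nil, msbAux]
  | cons v c ih =>
    rw [PySem.List.enumerate_cons, List.foldl_cons]
    rw [show (s : Int) + 1 = ((s + 1 : Nat) : Int) by push_cast; ring, ih]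
    simp [msbAux]

theorem step_inner (c : List Int) (j s : Nat) (pre tailb : List Int) (m : Int)
    (hj : c ≠ [] → 1 ≤ j ∧ j + c.length ≤ 7 ∧ s % 7 = j) :
    (PySem.List.enumerate c (s : Int)).foldl escapeStep (pre ++ m :: tailb, pre.length)
      = (pre ++ msbAux c j m :: (tailb ++ c.map (fun v => PySem.Int.band v 0x7F)), pre.length) := by
  induction c generalizing j s tailb m with
  | nil => simp [msbAux]
  | cons v c ih =>
    obtain ⟨h1, h2, h3⟩ := hj (by simp)
    have hmod : PySem.Int.mod (s : Int) 7 = ((j : Nat) : Int) := by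
      have := PySem.Int.mod_natCast s 7
      rw [h3] at this
      exact_mod_cast this
    have hj0 : ¬ (((j : Nat) : Int) = 0) := by omega
    have hstep : escapeStep (pre ++ m :: tailb, pre.length) ((s : Int), v)
        = (pre ++ (if PySem.Int.band v 0x80 ≠ 0 then PySem.Int.bor m ((1 : Int) <<< (j : Int)) else m)
            :: (tailb ++ [PySem.Int.band v 0x7F]), pre.length) := by
      by_cases hb : PySem.Int.band v 0x80 ≠ 0
      · simp only [escapeStep, hmod, if_neg hj0, if_pos hb]
        rw [show (pre ++ m :: tailb) ++ [PySem.Int.band v 0x7F]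
              = pre ++ m :: (tailb ++ [PySem.Int.band v 0x7F]) by simp]
        rw [modify_mid]
        simp [Int.shiftLeft_natCast_right]
      · simp only [escapeStep, hmod, if_neg hj0, if_neg hb]
        simp
    rw [PySem.List.enumerate_cons, List.foldl_cons, hstep,
        show (s : Int) + 1 = ((s + 1 : Nat) : Int) by push_cast; ring]
    rw [ih (j + 1) (s + 1) (tailb ++ [PySem.Int.band v 0x7F]) _
        (by intro hc; have : 1 ≤ c.length := List.length_pos_iff.mpr hc; simp at h2; omega)]
    simp [msbAux]

theorem step_chunk (c : List Int) (s : Nat) (res : List Int) (p : Nat)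
    (hne : c ≠ []) (h7 : c.length ≤ 7) (hs : s % 7 = 0) :
    (PySem.List.enumerate c (s : Int)).foldl escapeStep (res, p)
      = (res ++ msbAux c 0 0 :: c.map (fun v => PySem.Int.band v 0x7F), res.length) := by
  match c with
  | v :: c' =>
  have hmod : PySem.Int.mod (s : Int) 7 = 0 := by
    have := PySem.Int.mod_natCast s 7
    rw [hs] at this
    exact_mod_cast this
  have hstep : escapeStep (res, p) ((s : Int), v)
      = (res ++ (if PySem.Int.band v 0x80 ≠ 0 then PySem.Int.bor 0 ((1 : Int) <<< ((0 : Nat) : Int)) else 0)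
          :: [PySem.Int.band v 0x7F], res.length) := by
    by_cases hb : PySem.Int.band v 0x80 ≠ 0
    · simp only [escapeStep, hmod, if_pos hb, if_true]
      rw [show (res ++ [(0 : Int)]) ++ [PySem.Int.band v 0x7F]
            = res ++ (0 : Int) :: [PySem.Int.band v 0x7F] by simp]
      rw [modify_mid]
      simp
      decide
    · simp only [escapeStep, hmod, if_neg hb, if_true]
      simp
  rw [PySem.List.enumerate_cons, List.foldl_cons, hstep,
      show (s : Int) + 1 = ((s + 1 : Nat) : Int) by push_cast; ring]
  rw [step_inner c' 1 (s + 1) res [PySem.Int.band v 0x7F] _ (by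
    intro hc
    refine ⟨le_refl 1, ?_, by omega⟩
    simp at h7; omega)]
  simp [msbAux]

theorem alt_chunks (n : Nat) : ∀ (data : List Int), data.length ≤ n →
    ∀ (s : Nat) (res : List Int) (p : Nat), s % 7 = 0 →
    ((PySem.List.enumerate data (s : Int)).foldl escapeStep (res, p)).1 = res ++ specFn data := by
  induction n with
  | zero =>
    intro data h s res p hs
    have : data = [] := List.eq_nil_of_length_eq_zero (by omega)
    subst this
    simp [specFn_nil]
  | succ n ih =>
    intro data hlen s res p hs
    match data with
    | [] => simp [specFn_nil]
    | v :: l =>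
      have hsplit : v :: l = (v :: l).take 7 ++ l.drop 6 := by
        simp
      have hle : ((v :: l).take 7).length ≤ 7 := by simp
      conv_lhs => rw [hsplit]
      rw [PySem.List.enumerate_append, List.foldl_append,
          step_chunk _ s res p (by simp) hle hs]
      by_cases hrest : l.drop 6 = []
      · rw [hrest]
        simp [specFn_cons, specFn_nil, hrest, List.map_take]
      · have hlen7 : ((v :: l).take 7).length = 7 := by
          have : 6 < l.length := by
            by_contra hcon
            exact hrest (List.drop_eq_nil_of_le (by omega))
          simp; omega
        rw [hlen7, show (s : Int) + ((7 : Nat) : Int) = ((s + 7 : Nat) : Int) by push_cast; ring]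
        rw [ih (l.drop 6) (by simp at hlen ⊢; omega) (s + 7) _ _ (by omega)]
        rw [specFn_cons]
        simp [List.map_take]

theorem loop_eq (n : Nat) : ∀ (data : List Int) (index : Nat) (result : List Int),
    data.length - index ≤ n →
    escapeSysexLoop data index result = result ++ specFn (data.drop index) := by
  induction n with
  | zero =>
    intro data index result h
    rw [escapeSysexLoop, dif_neg (by omega : ¬ index < data.length)]
    rw [List.drop_eq_nil_of_le (by omega)]
    simp [specFn_nil]
  | succ n ih =>
    intro data index result h
    rw [escapeSysexLoop]
    by_cases hlt : index < data.length
    · rw [dif_pos hlt]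
      have hchunk : PySem.List.slice data (some (index : Int)) (some ((index : Int) + 7))
          = (data.drop index).take 7 := by
        have := PySem.List.slice_natCast_add data index 7
        simpa using this
      obtain ⟨v, l, hd⟩ : ∃ v l, data.drop index = v :: l := by
        cases hdr : data.drop index with
        | nil => exfalso; have := congrArg List.length hdr; simp at this; omega
        | cons v l => exact ⟨v, l, rfl⟩
      simp only [hchunk, PySem.List.foldl_append_singleton_eq_map]
      rw [show (PySem.List.enumerate ((data.drop index).take 7)).foldl
            (fun msb p => if PySem.Int.band p.2 0x80 ≠ 0 then PySem.Int.bor msb ((1 : Int) <<< p.1.toNat) else msb) 0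
            = msbAux ((data.drop index).take 7) 0 0 by
          simpa using msb_fold ((data.drop index).take 7) 0 0]
      rw [ih data (index + 7) _ (by omega)]
      have hdrop : data.drop (index + 7) = l.drop 6 := by
        rw [show data.drop (index + 7) = (data.drop index).drop 7 by
              rw [List.drop_drop]]
        rw [hd]
        rfl
      rw [hd, hdrop, specFn_cons]
      simp
    · rw [dif_neg hlt, List.drop_eq_nil_of_le (by omega)]
      simp [specFn_nil]

-- ===== VERDICT (by name: the statement is the Claim_ definition above) =====
theorem escapeSysex_spec : Claim_equal_escapeSysex := by
  intro data _
  unfold Spec_escapeSysex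
  have hA : escapeSysex data = specFn data := by
    have := loop_eq data.length data 0 [] (by omega)
    simpa [escapeSysex] using this
  have hB : escapeSysex_alt data = specFn data := by
    have := alt_chunks data.length data (le_refl _) 0 [] 0 (by norm_num)
    simpa [escapeSysex_alt] using this
  rw [hA, hB]
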